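-- pv_equiv track=rewrite | github.com/HangSingHui/ubs_coding_challenge | routes/efficient_hunter_kazuma.py | calculate_efficiency
-- ===== SOURCE A (Python) =====
-- def calculate_efficiency(monster_list):
--
--     n = len(monster_list)
--
--     # Memoization table to store the maximum efficiency from time `i` onwards
--     memo = [-1] * n
--
--     # Helper function to calculate max efficiency from time `i`
--     def dp(i):
--         # Base case: if we're beyond the last time frame, return 0
--         if i >= n:
--             return 0
--
--         # Return memoized result if it exists
--         if memo[i] != -1:
--             return memo[i]
--
--         # Case 1: Skip this time frame and move to rear (just carry forward the previous efficiency)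
--         max_efficiency = dp(i + 1)
--
--         # Case 2: Try preparing a circle at time `i` and attack at some `j > i`
--         cost = monster_list[i]  # The cost of preparing a circle at `i`
--         for j in range(i + 1, n):
--             gain = monster_list[j]  # The gold gained by attacking at `j`
--             # Efficiency is gain - cost, plus the best future efficiency from `j + 2` (because Kazuma must retreat)
--             efficiency = (gain - cost) + dp(j + 2)
--             # Update the maximum efficiency
--             max_efficiency = max(max_efficiency, efficiency)
--
--         # Memoize the result for time `i`
--         memo[i] = max_efficiency
--         return max_efficiency
--
--     # Start the recursion from time `0`
--     return dp(0)
-- ===== SOURCE B (Python) =====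
-- def calculate_efficiency(monster_list):
--     # Single backward pass: dp1 = dp[i+1], dp2 = dp[i+2],
--     # best = max over j >= i+1 of monster_list[j] + dp[j+2]  (None while empty).
--     dp1 = dp2 = 0
--     best = None
--     for x in reversed(monster_list):
--         cur = dp1 if best is None else max(dp1, best - x)
--         best = x + dp2 if best is None else max(best, x + dp2)
--         dp1, dp2 = cur, dp1
--     return dp1
-- ===== Notes on version B (the rewrite author's own statement) =====
-- stated objective: faster
-- what changed: Replaces A's memoized recursion with a quadratic inner scan (max over all attack times j>i) by a single backward pass that maintains dp[i+1], dp[i+2] and a running suffix maximum of monster[j]+dp[j+2], so the inner loop disappears.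
import Mathlib
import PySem

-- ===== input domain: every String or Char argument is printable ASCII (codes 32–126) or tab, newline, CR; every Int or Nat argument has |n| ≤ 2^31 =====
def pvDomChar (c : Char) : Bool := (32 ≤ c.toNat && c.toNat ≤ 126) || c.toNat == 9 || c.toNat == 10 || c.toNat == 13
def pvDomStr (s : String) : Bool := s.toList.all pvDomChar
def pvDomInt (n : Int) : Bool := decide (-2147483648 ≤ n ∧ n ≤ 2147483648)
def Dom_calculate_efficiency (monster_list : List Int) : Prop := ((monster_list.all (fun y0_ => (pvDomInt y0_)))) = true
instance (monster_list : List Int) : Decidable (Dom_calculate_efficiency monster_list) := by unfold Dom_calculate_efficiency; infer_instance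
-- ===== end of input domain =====

-- B replaces A's memoized O(n^2) recursion by one backward pass keeping a suffix maximum of
-- monster[j] + dp[j+2]; equivalence of return values proved (A also mutates no argument).

-- ===== PORT A =====
-- A's dp(i): if i >= n then 0 else max(dp(i+1), max_{j in range(i+1,n)} (m[j]-m[i]) + dp(j+2)).
-- A's memo table is a pure cache (memo[i] only ever stores dp(i); the -1 sentinel colliding with a
-- true value -1 merely recomputes the same value), so it is value-transparent and the recursion is
-- ported directly, made total with fuel: every call site has fuel ≥ n - i (proved in the lemmas),
-- so the fuel-0 branch is never reached from calculate_efficiency.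
def dpA (m : List Int) : Nat → Nat → Int
  | fuel, i =>
    if m.length ≤ i then 0
    else match fuel with
      | 0 => 0  -- unreachable
      | f + 1 =>
        -- for j in range(i+1, n): range(i+1, n) on these nonnegative ints is List.range' (i+1) (n-(i+1))
        (List.range' (i + 1) (m.length - (i + 1))).foldl
          (fun acc j => max acc ((m.getD j 0 - m.getD i 0) + dpA m f (j + 2)))
          (dpA m f (i + 1))

def calculate_efficiency (monster_list : List Int) : Int :=
  dpA monster_list monster_list.length 0

-- ===== PORT B =====
-- state (dp1, dp2, best): the 'for x in reversed(monster_list)' loop is a foldr over the list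
def calculate_efficiency_alt (monster_list : List Int) : Int :=
  (monster_list.foldr
    (fun x (s : Int × Int × Option Int) =>
      let dp1 := s.1; let dp2 := s.2.1; let best := s.2.2
      let cur := match best with | none => dp1 | some b => max dp1 (b - x)
      let best' := some (match best with | none => x + dp2 | some b => max b (x + dp2))
      (cur, dp1, best'))
    (0, 0, none)).1

-- ===== PRECONDITION & SPEC =====
def Spec_calculate_efficiency (monster_list : List Int) (out : Int) : Prop := out = calculate_efficiency_alt monster_list
instance (monster_list : List Int) (out : Int) : Decidable (Spec_calculate_efficiency monster_list out) := by unfold Spec_calculate_efficiency; infer_instance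

-- ===== CLAIM (what is proved, stated in full; the proofs are below) =====
def Claim_equal_calculate_efficiency : Prop := ∀ (monster_list : List Int), Dom_calculate_efficiency monster_list → Spec_calculate_efficiency monster_list (calculate_efficiency monster_list)

-- ===== LEMMAS AND PROOFS =====

-- Mathematical value of A's dp on suffixes, as one structural list function:
-- DS l = (Dv l, Dv l.tail, Sv l) where Dv l = dp value of the suffix l and
-- Sv l = max over positions j of l of (l[j] + dp of the suffix starting 2 after j).
def DS : List Int → Int × Int × Option Int
  | [] => (0, 0, none)
  | x :: xs =>
    let p := DS xs
    ((match p.2.2 with | none => p.1 | some b => max p.1 (b - x)),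
     p.1,
     some (match p.2.2 with | none => x + p.2.1 | some b => max b (x + p.2.1)))

def Dv (l : List Int) : Int := (DS l).1

def Sv (l : List Int) : Option Int := (DS l).2.2

theorem DS_snd (l : List Int) : (DS l).2.1 = Dv (l.tail) := by
  cases l <;> rfl

theorem Dv_nil : Dv [] = 0 := rfl

theorem Sv_nil : Sv [] = none := rfl

theorem Dv_cons (x : Int) (xs : List Int) :
    Dv (x :: xs) = match Sv xs with | none => Dv xs | some b => max (Dv xs) (b - x) := rfl

theorem Sv_cons (x : Int) (xs : List Int) :
    Sv (x :: xs)
      = some (match Sv xs with | none => x + Dv xs.tail | some b => max b (x + Dv xs.tail)) := by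
  rw [← DS_snd]; rfl

theorem max_shift1 (a x c d : Int) : max a (x - c + d) = max a (x + d - c) := by omega

theorem max_shift2 (a b x c d : Int) :
    max (max a (x - c + d)) (b - c) = max a (max b (x + d) - c) := by omega

theorem foldl_congr_mem' {α β : Type} (l : List α) (f g : β → α → β) (init : β)
    (h : ∀ acc x, x ∈ l → f acc x = g acc x) : l.foldl f init = l.foldl g init := by
  induction l generalizing init with
  | nil => rfl
  | cons y ys ih =>
    rw [List.foldl_cons, List.foldl_cons, h init y (by simp)]
    exact ih _ (fun acc x hx => h acc x (by simp [hx]))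

-- the inner for-loop over j computes exactly the Sv-combination
theorem foldS (m : List Int) (c a : Int) (k : Nat) :
    (List.range' k (m.length - k)).foldl
        (fun acc j => max acc ((m.getD j 0 - c) + Dv (m.drop (j + 2)))) a
      = match Sv (m.drop k) with
        | none => a
        | some b => max a (b - c) := by
  by_cases h : m.length ≤ k
  · have h0 : m.length - k = 0 := by omega
    have hd : m.drop k = [] := List.drop_eq_nil_iff.mpr h
    simp [h0, hd, Sv_nil]
  · push Not at h
    have hk : m.length - k = (m.length - (k + 1)) + 1 := by omega
    have hdk : m.drop k = m[k] :: m.drop (k + 1) := List.drop_eq_getElem_cons h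
    have hgd : m.getD k 0 = m[k] := by simp [List.getD, List.getElem?_eq_getElem h]
    have htail : (m.drop (k + 1)).tail = m.drop (k + 2) := by rw [List.tail_drop]
    have ih := foldS m c (max a ((m.getD k 0 - c) + Dv (m.drop (k + 2)))) (k + 1)
    rw [hk, List.range'_succ, List.foldl_cons, ih, hdk, Sv_cons, htail, hgd]
    cases hs : Sv (m.drop (k + 1)) with
    | none => exact max_shift1 ..
    | some b => exact max_shift2 ..
termination_by m.length - k

-- with enough fuel, A's dp(i) equals Dv of the suffix starting at i
theorem dpA_eq_Dv (m : List Int) : ∀ fuel i, m.length - i ≤ fuel →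
    dpA m fuel i = Dv (m.drop i) := by
  intro fuel
  induction fuel with
  | zero =>
    intro i hi
    have h : m.length ≤ i := by omega
    rw [dpA, if_pos h, List.drop_eq_nil_iff.mpr h, Dv_nil]
  | succ f ih =>
    intro i hi
    by_cases h : m.length ≤ i
    · rw [dpA, if_pos h, List.drop_eq_nil_iff.mpr h, Dv_nil]
    · push Not at h
      rw [dpA, if_neg (by omega)]
      rw [foldl_congr_mem' _ _
            (fun acc j => max acc ((m.getD j 0 - m.getD i 0) + Dv (m.drop (j + 2)))) _
            (fun acc j hj => by
              have hj' := List.mem_range'.mp hj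
              rw [ih (j + 2) (by omega)]),
          ih (i + 1) (by omega),
          foldS m (m.getD i 0) (Dv (m.drop (i + 1))) (i + 1)]
      have hdk : m.drop i = m[i] :: m.drop (i + 1) := List.drop_eq_getElem_cons h
      have hgd : m.getD i 0 = m[i] := by simp [List.getD, List.getElem?_eq_getElem h]
      rw [hdk, hgd, Dv_cons]

-- B's foldr state invariant: after folding the list l the state is exactly DS l
theorem foldr_inv (l : List Int) :
    l.foldr
      (fun x (s : Int × Int × Option Int) =>
        let dp1 := s.1; let dp2 := s.2.1; let best := s.2.2
        let cur := match best with | none => dp1 | some b => max dp1 (b - x)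
        let best' := some (match best with | none => x + dp2 | some b => max b (x + dp2))
        (cur, dp1, best'))
      (0, 0, none)
    = DS l := by
  induction l with
  | nil => rfl
  | cons x xs ih => rw [List.foldr_cons, ih]; rfl

-- ===== VERDICT (by name: the statement is the Claim_ definition above) =====
theorem calculate_efficiency_spec : Claim_equal_calculate_efficiency := by
  intro m _
  show calculate_efficiency m = calculate_efficiency_alt m
  rw [calculate_efficiency, dpA_eq_Dv m m.length 0 (by omega),
      calculate_efficiency_alt, foldr_inv, List.drop_zero]
  rfl
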